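-- pv_equiv track=rewrite | github.com/Pedrochem/CogsDataAug | code/last_exp_substructure_pp_subs.py | get_nmods
-- ===== SOURCE A (Python) =====
-- def valid_np_nmod(np_nmod):
--     if np_nmod.count(' PP ') >= 2:
--         return True
--     if 'to//i' in np_nmod:
--         return False
--
-- def get_nmods(inp,nmods):
--     splits = inp.split(' ')
--     brackets = None
--     np_found = False
--
--     for i,word in enumerate(splits):
--
--         if not np_found and word == 'PP':
--             np_found = True
--             np_pos = i
--             brackets = 1
--
--         if  np_found:
--             if word == '(':
--                 brackets+=1
--             elif word == ')':
--                 brackets-=1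
--             if brackets == 0:
--                 np = '( ' + ' '.join(splits[np_pos:i+1])
--                 np_found = False
--                 if valid_np_nmod(np):
--                     # np = np[5:]
--                     nmods.append(np)
--
--     return nmods
-- ===== SOURCE B (Python) =====
-- def get_nmods(inp, nmods):
--     # Appends to nmods in place, like the original.
--     splits = inp.split(' ')
--     # prefix bracket-depth profile: D[k] = depth before token k
--     D = [0]
--     for w in splits:
--         D.append(D[-1] + (w == '(') - (w == ')'))
--     pps = [i for i, w in enumerate(splits) if w == 'PP']
--     cursor = 0
--     for p in pps:
--         if p < cursor:
--             continue
--         q = next((q for q, d in enumerate(D) if q > p and d == D[p] - 1), None)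
--         if q is None:
--             break
--         np = '( ' + ' '.join(splits[p:q])
--         if np.count(' PP ') >= 2:
--             nmods.append(np)
--         cursor = q
--     return nmods
-- ===== Notes on version B (the rewrite author's own statement) =====
-- stated objective: alternative
-- what changed: A is a one-pass frozen state machine carrying np_found/np_pos/brackets; B precomputes the bracket-depth prefix profile D and the list of PP token positions, then pairs each PP at or past a cursor with the first later depth crossing D[q] == D[p]-1 in the profile.
import Mathlib
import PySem

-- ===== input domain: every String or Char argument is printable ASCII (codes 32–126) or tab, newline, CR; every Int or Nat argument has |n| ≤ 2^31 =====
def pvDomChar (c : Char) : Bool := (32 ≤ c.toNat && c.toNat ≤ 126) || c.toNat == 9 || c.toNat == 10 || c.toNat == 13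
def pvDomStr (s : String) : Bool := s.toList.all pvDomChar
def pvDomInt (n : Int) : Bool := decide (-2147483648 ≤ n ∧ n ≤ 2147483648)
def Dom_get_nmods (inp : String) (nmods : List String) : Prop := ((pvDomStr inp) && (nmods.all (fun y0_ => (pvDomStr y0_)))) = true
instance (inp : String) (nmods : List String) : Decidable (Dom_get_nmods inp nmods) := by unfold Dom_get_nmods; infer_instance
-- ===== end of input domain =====

-- B replaces A's one-pass frozen state machine by a precomputed bracket-depth profile plus a
-- PP-position/cursor loop (alternative decomposition, same cost); like A, B appends to nmods in place.


-- ===== PORT A =====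
-- valid_np_nmod returns True / False / None in Python; ported as Option Bool (none = None);
-- the call site tests Python truthiness, i.e. `= some true`.
def valid_np_nmod (np_nmod : String) : Option Bool :=
  if 2 ≤ PySem.Str.count np_nmod " PP " then some true
  else if PySem.Str.isIn "to//i" np_nmod then some false
  else none

-- the for-loop of A, one step per (i, word) of enumerate(splits); state = (nmods, np_found, np_pos, brackets)
def aLoop (splits : List String) : List (Int × String) → List String → Bool → Int → Int → List String
  | [], nmods, _, _, _ => nmods
  | (i, word) :: rest, nmods, np_found0, np_pos0, brackets0 =>
    let st := if !np_found0 && word == "PP" then (true, i, (1 : Int)) else (np_found0, np_pos0, brackets0)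
    let np_found := st.1
    let np_pos := st.2.1
    let brackets := st.2.2
    if np_found then
      let brackets := if word == "(" then brackets + 1 else if word == ")" then brackets - 1 else brackets
      if brackets == 0 then
        let np := "( " ++ PySem.Str.join " " (PySem.List.slice splits (some np_pos) (some (i + 1)))
        let nmods := if valid_np_nmod np = some true then nmods ++ [np] else nmods
        aLoop splits rest nmods false np_pos brackets
      else
        aLoop splits rest nmods np_found np_pos brackets
    else
      aLoop splits rest nmods np_found np_pos brackets

def get_nmods (inp : String) (nmods : List String) : List String :=
  let splits := (PySem.Str.split? inp " ").getD []   -- sep " " ≠ "": split? never none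
  -- brackets = None, np_found = False initially; brackets/np_pos are only read after being set,
  -- so the dummy initial values 0, 0 are never observed
  aLoop splits (PySem.List.enumerate splits 0) nmods false 0 0

-- ===== PORT B =====
-- D = [0]; for w in splits: D.append(D[-1] + (w == '(') - (w == ')'))
def bDepths (splits : List String) : List Int :=
  splits.foldl
    (fun D w => D ++ [PySem.List.pyGetD D (-1) 0 + (if w == "(" then 1 else 0) - (if w == ")" then 1 else 0)])
    [0]

-- the cursor loop over the PP positions; D[p] is always in range, so plain pyGetD is exact here
def bLoop (splits : List String) (D : List Int) : List Int → Int → List String → List String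
  | [], _, nmods => nmods
  | p :: ps, cursor, nmods =>
    if p < cursor then
      bLoop splits D ps cursor nmods
    else
      match List.find? (fun qd => decide (p < qd.1) && (qd.2 == PySem.List.pyGetD D p 0 - 1))
              (PySem.List.enumerate D 0) with
      | none => nmods
      | some qd =>
        let np := "( " ++ PySem.Str.join " " (PySem.List.slice splits (some p) (some qd.1))
        let nmods := if 2 ≤ PySem.Str.count np " PP " then nmods ++ [np] else nmods
        bLoop splits D ps qd.1 nmods

def get_nmods_alt (inp : String) (nmods : List String) : List String :=
  let splits := (PySem.Str.split? inp " ").getD []   -- sep " " ≠ "": split? never none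
  let D := bDepths splits
  let pps := ((PySem.List.enumerate splits 0).filter (fun iw => iw.2 == "PP")).map (·.1)
  bLoop splits D pps 0 nmods

-- ===== PRECONDITION & SPEC =====
def Spec_get_nmods (inp : String) (nmods : List String) (out : List String) : Prop := out = get_nmods_alt inp nmods
instance (inp : String) (nmods : List String) (out : List String) : Decidable (Spec_get_nmods inp nmods out) := by unfold Spec_get_nmods; infer_instance

-- ===== CLAIM (what is proved, stated in full; the proofs are below) =====
def Claim_equal_get_nmods : Prop := ∀ (inp : String) (nmods : List String), Dom_get_nmods inp nmods → Spec_get_nmods inp nmods (get_nmods inp nmods)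

-- ===== LEMMAS AND PROOFS =====

-- bracket delta of one token
def pvDelta (w : String) : Int := (if w == "(" then 1 else 0) - (if w == ")" then 1 else 0)

-- the depth profile after a prefix of depth d
def pvDepthsFrom (d : Int) : List String → List Int
  | [] => []
  | w :: ws => (d + pvDelta w) :: pvDepthsFrom (d + pvDelta w) ws

-- first q in (i, n] with D[q] = c
def pvFc (D : List Int) (c : Int) (i n : Nat) : Option Nat :=
  (List.range' (i + 1) (n - i)).find? (fun q => D.getD q 0 == c)

theorem pvFoldD (l : List String) : ∀ (acc : List Int) (x : Int),
    l.foldl (fun D w => D ++ [PySem.List.pyGetD D (-1) 0 + (if w == "(" then 1 else 0) - (if w == ")" then 1 else 0)]) (acc ++ [x])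
      = acc ++ [x] ++ pvDepthsFrom x l := by
  induction l with
  | nil => intro acc x; simp [pvDepthsFrom]
  | cons w ws ih =>
    intro acc x
    have h1 : PySem.List.pyGetD (acc ++ [x]) (-1) (0 : Int) = x :=
      PySem.List.pyGetD_neg_one_append_singleton acc x 0
    simp only [List.foldl_cons, h1, pvDepthsFrom]
    have h2 : x + (if w == "(" then (1:Int) else 0) - (if w == ")" then 1 else 0) = x + pvDelta w := by
      unfold pvDelta; omega
    rw [h2]
    have := ih (acc ++ [x]) (x + pvDelta w)
    simpa using this

theorem bDepths_eq (T : List String) : bDepths T = 0 :: pvDepthsFrom 0 T := by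
  have := pvFoldD T [] 0
  simpa [bDepths] using this

theorem length_pvDepthsFrom (d : Int) (l : List String) : (pvDepthsFrom d l).length = l.length := by
  induction l generalizing d with
  | nil => simp [pvDepthsFrom]
  | cons w ws ih => simp [pvDepthsFrom, ih]

theorem length_bDepths (T : List String) : (bDepths T).length = T.length + 1 := by
  rw [bDepths_eq]; simp [length_pvDepthsFrom]

theorem pvDF_step (l : List String) : ∀ (d : Int) (j : Nat), j < l.length →
    (d :: pvDepthsFrom d l).getD (j + 1) 0 = (d :: pvDepthsFrom d l).getD j 0 + pvDelta (l.getD j "") := by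
  induction l with
  | nil => intro d j h; simp at h
  | cons w ws ih =>
    intro d j h
    cases j with
    | zero => simp [pvDepthsFrom]
    | succ j =>
      have := ih (d + pvDelta w) j (by simpa using Nat.lt_of_succ_lt_succ h)
      simpa [pvDepthsFrom] using this

theorem bDepths_step (T : List String) (i : Nat) (h : i < T.length) :
    (bDepths T).getD (i + 1) 0 = (bDepths T).getD i 0 + pvDelta (T.getD i "") := by
  rw [bDepths_eq]; exact pvDF_step T 0 i h

theorem pvFc_none (D : List Int) (c : Int) (i n : Nat) (h : n ≤ i) : pvFc D c i n = none := by
  unfold pvFc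
  have : n - i = 0 := by omega
  simp [this]

theorem pvFc_step (D : List Int) (c : Int) (i n : Nat) (h : i < n) :
    pvFc D c i n = if D.getD (i + 1) 0 == c then some (i + 1) else pvFc D c (i + 1) n := by
  unfold pvFc
  have h1 : n - i = (n - (i + 1)) + 1 := by omega
  rw [h1, List.range'_succ, List.find?_cons]
  cases hc : (D.getD (i + 1) 0 == c) with
  | true => simp
  | false => simp

theorem pvFc_some (D : List Int) (c : Int) (i n q : Nat) (h : pvFc D c i n = some q) :
    i < q ∧ q ≤ n ∧ D.getD q 0 = c := by
  unfold pvFc at h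
  have hm := List.mem_of_find?_eq_some h
  have hp := List.find?_some h
  rw [List.mem_range'_1] at hm
  refine ⟨by omega, by omega, by simpa using hp⟩

-- the find? of B over enumerate, reduced to a Nat-indexed search
theorem pvFind_aux (D0 : List Int) (p : Nat) (c : Int) : ∀ (l : List Int) (s : Nat), l = D0.drop s →
    List.find? (fun qd => decide ((p : Int) < qd.1) && (qd.2 == c)) (PySem.List.enumerate l (s : Int))
      = ((List.range' s l.length).find? (fun q => decide (p < q) && (D0.getD q 0 == c))).map
          (fun (q : Nat) => ((q : Int), D0.getD q 0)) := by
  intro l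
  induction l with
  | nil => intro s _; rfl
  | cons x l' ih =>
    intro s hs
    have h0 : D0[s]? = some x := by
      have h1 : (D0.drop s)[0]? = some x := by rw [← hs]; rfl
      simpa [List.getElem?_drop] using h1
    have hx : D0.getD s 0 = x := by rw [List.getD_eq_getElem?_getD, h0]; rfl
    have hl' : l' = D0.drop (s + 1) := by
      have h2 := congrArg List.tail hs
      simpa [List.tail_drop] using h2
    rw [PySem.List.enumerate_cons]
    rw [show (x :: l').length = l'.length + 1 from rfl, List.range'_succ]
    rw [List.find?_cons, List.find?_cons]
    have hhead : (decide ((p : Int) < (s : Int)) && (x == c)) = (decide (p < s) && (D0.getD s 0 == c)) := by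
      rw [hx]; simp
    simp only [hhead]
    cases hb : (decide (p < s) && (D0.getD s 0 == c)) with
    | true => simp [h0]
    | false =>
      have h3 := ih (s + 1) hl'
      rw [show ((s : Int) + 1) = (((s + 1 : Nat)) : Int) by push_cast; ring]
      exact h3

-- only-if-true conjunct removal for find? over a list where p < q always holds
theorem pvFind_drop_lt (p : Nat) (f : Nat → Bool) :
    ∀ (l : List Nat), (∀ q ∈ l, p < q) →
      l.find? (fun q => decide (p < q) && f q) = l.find? f := by
  intro l
  induction l with
  | nil => intro _; rfl
  | cons a l ih =>
    intro h
    rw [List.find?_cons, List.find?_cons]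
    have ha : decide (p < a) = true := by simp [h a (by simp)]
    rw [ha]
    cases hf : f a with
    | true => simp
    | false => simpa using ih (fun q hq => h q (by simp [hq]))

-- B's find? over enumerate D equals the first-crossing search pvFc
theorem pvFind (D : List Int) (p : Nat) (hp : p + 1 ≤ D.length) :
    List.find? (fun qd => decide ((p : Int) < qd.1) && (qd.2 == D.getD p 0 - 1)) (PySem.List.enumerate D 0)
      = (pvFc D (D.getD p 0 - 1) p (D.length - 1)).map (fun (q : Nat) => ((q : Int), D.getD q 0)) := by
  have h0 := pvFind_aux D p (D.getD p 0 - 1) D 0 (by simp)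
  rw [show ((0 : Nat) : Int) = 0 by simp] at h0
  rw [h0]
  have hsplit : List.range' 0 D.length = List.range' 0 (p + 1) ++ List.range' (p + 1) (D.length - (p + 1)) := by
    have := List.range'_append (s := 0) (m := p + 1) (n := D.length - (p + 1)) (step := 1)
    simp only [Nat.zero_add, Nat.one_mul] at this
    have h4 : p + 1 + (D.length - (p + 1)) = D.length := by omega
    rw [h4] at this
    exact this.symm
  rw [hsplit, List.find?_append]
  have hnone : (List.range' 0 (p + 1)).find? (fun q => decide (p < q) && (D.getD q 0 == D.getD p 0 - 1)) = none := by
    rw [List.find?_eq_none]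
    intro q hq
    rw [List.mem_range'_1] at hq
    simp [show ¬ p < q by omega]
  rw [hnone]
  have htail := pvFind_drop_lt p (fun q => D.getD q 0 == D.getD p 0 - 1)
      (List.range' (p + 1) (D.length - (p + 1)))
      (by intro q hq; rw [List.mem_range'_1] at hq; omega)
  rw [Option.none_or, htail]
  unfold pvFc
  have h5 : D.length - (p + 1) = D.length - 1 - p := by omega
  rw [h5]

-- how A updates the bracket counter, as a delta
theorem pvBrStep (br : Int) (w : String) :
    (if w == "(" then br + 1 else if w == ")" then br - 1 else br) = br + pvDelta w := by
  unfold pvDelta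
  by_cases h1 : w = "("
  · subst h1; simp
  · by_cases h2 : w = ")"
    · subst h2; simp; omega
    · simp [h1, h2]

-- A's in-span walk: it closes exactly at the first depth crossing, or never
theorem pvSpan (T : List String) (p : Nat) (nmods : List String) :
    ∀ (m i : Nat), T.length ≤ i + m → p < i →
      aLoop T (PySem.List.enumerate (T.drop i) (i : Int)) nmods true (p : Int)
          (1 + (bDepths T).getD i 0 - (bDepths T).getD p 0)
        = match pvFc (bDepths T) ((bDepths T).getD p 0 - 1) i T.length with
          | none => nmods
          | some q =>
            aLoop T (PySem.List.enumerate (T.drop q) (q : Int))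
              (if valid_np_nmod ("( " ++ PySem.Str.join " " (PySem.List.slice T (some (p : Int)) (some (q : Int)))) = some true
               then nmods ++ ["( " ++ PySem.Str.join " " (PySem.List.slice T (some (p : Int)) (some (q : Int)))]
               else nmods)
              false (p : Int) 0
          := by
  intro m
  induction m with
  | zero =>
    intro i hi _
    have hdrop : T.drop i = [] := List.drop_eq_nil_of_le (by omega)
    rw [hdrop, pvFc_none _ _ _ _ (by omega)]
    rfl
  | succ m ih =>
    intro i hi hpi
    by_cases hin : T.length ≤ i
    · have hdrop : T.drop i = [] := List.drop_eq_nil_of_le hin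
      rw [hdrop, pvFc_none _ _ _ _ hin]
      rfl
    · rw [Nat.not_le] at hin
      rw [List.drop_eq_getElem_cons hin, PySem.List.enumerate_cons]
      simp only [aLoop, Bool.not_true, Bool.false_and, Bool.false_eq_true, if_false]
      rw [pvBrStep]
      rw [show (1 + (bDepths T).getD i 0 - (bDepths T).getD p 0 + pvDelta T[i])
            = 1 + (bDepths T).getD (i + 1) 0 - (bDepths T).getD p 0 by
        rw [bDepths_step T i hin, List.getD_eq_getElem T "" hin]; ring]
      rw [if_pos trivial, pvFc_step _ _ _ _ hin,
        show ((i : Int) + 1) = ((i + 1 : Nat) : Int) by push_cast; ring]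
      cases hz : (1 + (bDepths T).getD (i + 1) 0 - (bDepths T).getD p 0 == 0) with
      | true =>
        have h6 : 1 + (bDepths T).getD (i + 1) 0 - (bDepths T).getD p 0 = 0 := by
          simpa using hz
        have hz' : ((bDepths T).getD (i + 1) 0 == (bDepths T).getD p 0 - 1) = true := by
          simp only [beq_iff_eq]; omega
        rw [hz', h6]
        simp
      | false =>
        have h6 : ¬ (1 + (bDepths T).getD (i + 1) 0 - (bDepths T).getD p 0 = 0) := by
          simpa using hz
        have hz' : ((bDepths T).getD (i + 1) 0 == (bDepths T).getD p 0 - 1) = false := by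
          simp only [beq_eq_false_iff_ne, ne_eq]; omega
        rw [hz']
        simp only [Bool.false_eq_true, if_false]
        exact ih (i + 1) (by omega) (by omega)

theorem pvEnumApp {α : Type} (xs ys : List α) : ∀ (s : Int),
    PySem.List.enumerate (xs ++ ys) s
      = PySem.List.enumerate xs s ++ PySem.List.enumerate ys (s + xs.length) := by
  induction xs with
  | nil => intro s; simp [PySem.List.enumerate]
  | cons x xs ih =>
    intro s
    rw [List.cons_append, PySem.List.enumerate_cons, PySem.List.enumerate_cons, ih (s + 1)]
    congr 3
    simp [List.length_cons]
    omega

theorem pvEnumMemFst {α : Type} (f : Int × α → Bool) (l : List α) (s x : Int)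
    (hx : x ∈ ((PySem.List.enumerate l s).filter f).map (fun iw => iw.1)) :
    s ≤ x ∧ x < s + l.length := by
  rw [List.mem_map] at hx
  obtain ⟨qd, hq, rfl⟩ := hx
  have h1 : qd ∈ PySem.List.enumerate l s := (List.mem_filter.mp hq).1
  have h2 : qd.1 ∈ (PySem.List.enumerate l s).map (fun z => z.1) :=
    List.mem_map_of_mem h1
  rw [PySem.List.map_fst_enumerate] at h2
  exact PySem.List.mem_pyRange_one.mp h2

theorem pvSkip (T : List String) (D : List Int) (c : Int) (nmods : List String) :
    ∀ (l1 l2 : List Int), (∀ x ∈ l1, x < c) →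
      bLoop T D (l1 ++ l2) c nmods = bLoop T D l2 c nmods := by
  intro l1
  induction l1 with
  | nil => intro l2 _; rfl
  | cons a l1 ih =>
    intro l2 h
    rw [List.cons_append]
    simp only [bLoop]
    rw [if_pos (h a (by simp))]
    exact ih l2 (fun x hx => h x (by simp [hx]))

theorem pvCursorHead (T : List String) (D : List Int) (ps : List Int) (c c' : Int)
    (nmods : List String) (h : ∀ x ∈ ps, c ≤ x) (h' : ∀ x ∈ ps, c' ≤ x) :
    bLoop T D ps c nmods = bLoop T D ps c' nmods := by
  cases ps with
  | nil => rfl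
  | cons p ps =>
    simp only [bLoop]
    rw [if_neg (by have := h p (by simp); omega), if_neg (by have := h' p (by simp); omega)]

theorem pvValidIff (np : String) :
    (valid_np_nmod np = some true) ↔ (2 ≤ PySem.Str.count np " PP ") := by
  unfold valid_np_nmod
  split_ifs with h1 h2
  · exact iff_of_true rfl h1
  · exact iff_of_false (by simp) h1
  · exact iff_of_false (by simp) h1

theorem pvPPsplit (T : List String) (k q : Nat) (hkq : k ≤ q) (hq : q ≤ T.length) :
    ((PySem.List.enumerate (T.drop k) (k : Int)).filter (fun iw => iw.2 == "PP")).map (fun iw => iw.1)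
      = ((PySem.List.enumerate ((T.drop k).take (q - k)) (k : Int)).filter (fun iw => iw.2 == "PP")).map (fun iw => iw.1)
        ++ ((PySem.List.enumerate (T.drop q) (q : Int)).filter (fun iw => iw.2 == "PP")).map (fun iw => iw.1) := by
  have hdec : T.drop k = (T.drop k).take (q - k) ++ T.drop q := by
    conv_lhs => rw [← List.take_append_drop (q - k) (T.drop k)]
    rw [List.drop_drop, show k + (q - k) = q by omega]
  have hlen : (((T.drop k).take (q - k)).length : Int) = (q : Int) - (k : Int) := by
    rw [List.length_take, List.length_drop]
    omega
  conv_lhs => rw [hdec]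
  rw [pvEnumApp, hlen, show (k : Int) + ((q : Int) - (k : Int)) = (q : Int) by ring]
  rw [List.filter_append, List.map_append]

theorem pvMain (T : List String) : ∀ (m k : Nat), T.length ≤ k + m →
    ∀ (nmods : List String) (pos br : Int),
    aLoop T (PySem.List.enumerate (T.drop k) (k : Int)) nmods false pos br
      = bLoop T (bDepths T)
          (((PySem.List.enumerate (T.drop k) (k : Int)).filter (fun iw => iw.2 == "PP")).map (fun iw => iw.1))
          (k : Int) nmods := by
  intro m
  induction m with
  | zero =>
    intro k hk nmods pos br
    rw [List.drop_eq_nil_of_le (by omega)]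
    rfl
  | succ m ih =>
    intro k hk nmods pos br
    by_cases hkn : T.length ≤ k
    · rw [List.drop_eq_nil_of_le hkn]
      rfl
    · rw [Nat.not_le] at hkn
      rw [List.drop_eq_getElem_cons hkn, PySem.List.enumerate_cons]
      by_cases hPP : T[k] = "PP"
      · -- the PP case: A enters a span; B pairs k with the first depth crossing
        rw [hPP]
        have hself : (("PP" : String) == "PP") = true := by decide
        have hpo : (("PP" : String) == "(") = false := by decide
        have hpc : (("PP" : String) == ")") = false := by decide
        have h10 : (((1 : Int)) == 0) = false := by decide
        simp only [aLoop, hself, hpo, hpc, h10, Bool.not_false, Bool.true_and, if_true,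
          Bool.false_eq_true, if_false]
        rw [show ((k : Int) + 1) = ((k + 1 : Nat) : Int) by push_cast; ring]
        have hD : (bDepths T).getD (k + 1) 0 = (bDepths T).getD k 0 := by
          rw [bDepths_step T k hkn, List.getD_eq_getElem T "" hkn, hPP]
          have hdel : pvDelta "PP" = 0 := by decide
          rw [hdel]; ring
        have hspan := pvSpan T k nmods m (k + 1) (by omega) (by omega)
        rw [hD, show 1 + (bDepths T).getD k 0 - (bDepths T).getD k 0 = 1 from by ring] at hspan
        rw [hspan]
        simp only [List.filter_cons, hself, if_true, List.map_cons]
        simp only [bLoop]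
        rw [if_neg (lt_irrefl _)]
        simp only [PySem.List.pyGetD_natCast]
        rw [pvFind (bDepths T) k (by rw [length_bDepths]; omega)]
        rw [show (bDepths T).length - 1 = T.length from by rw [length_bDepths]; omega]
        rw [pvFc_step _ _ _ _ hkn, hD]
        rw [show ((bDepths T).getD k 0 == (bDepths T).getD k 0 - 1) = false from by
          simp only [beq_eq_false_iff_ne, ne_eq]; omega]
        simp only [Bool.false_eq_true, if_false]
        cases hfc : pvFc (bDepths T) ((bDepths T).getD k 0 - 1) (k + 1) T.length with
        | none => rfl
        | some q =>
          obtain ⟨hq1, hq2, hq3⟩ := pvFc_some _ _ _ _ _ hfc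
          simp only [Option.map_some]
          rw [show (if valid_np_nmod ("( " ++ PySem.Str.join " " (PySem.List.slice T (some (k : Int)) (some (q : Int)))) = some true
                then nmods ++ ["( " ++ PySem.Str.join " " (PySem.List.slice T (some (k : Int)) (some (q : Int)))]
                else nmods)
              = (if 2 ≤ PySem.Str.count ("( " ++ PySem.Str.join " " (PySem.List.slice T (some (k : Int)) (some (q : Int)))) " PP "
                then nmods ++ ["( " ++ PySem.Str.join " " (PySem.List.slice T (some (k : Int)) (some (q : Int)))]
                else nmods) from if_congr (pvValidIff _) rfl rfl]
          rw [ih q (by omega)]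
          rw [pvPPsplit T (k + 1) q (by omega) hq2]
          rw [pvSkip T (bDepths T) (q : Int) _ _ _ ?hbound]
          case hbound =>
            intro x hx
            have h2 := pvEnumMemFst _ _ _ _ hx
            have hlen : ((((T.drop (k + 1)).take (q - (k + 1))).length : Nat) : Int)
                = (q : Int) - ((k + 1 : Nat) : Int) := by
              rw [List.length_take, List.length_drop]
              push_cast
              omega
            omega
      · -- no PP at k: A skips the token, B's PP list drops nothing here
        have hb : (T[k] == "PP") = false := by simpa using hPP
        simp only [aLoop, hb, Bool.not_false, Bool.true_and, Bool.false_eq_true, if_false]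
        rw [show ((k : Int) + 1) = ((k + 1 : Nat) : Int) by push_cast; ring]
        rw [ih (k + 1) (by omega) nmods pos br]
        simp only [List.filter_cons, hb, Bool.false_eq_true, if_false]
        apply pvCursorHead
        · intro x hx
          have h2 := pvEnumMemFst _ _ _ _ hx
          have : ((k + 1 : Nat) : Int) ≤ x := h2.1
          omega
        · intro x hx
          have h2 := (pvEnumMemFst _ _ _ _ hx).1
          have h3 : ((k : Int)) ≤ ((k + 1 : Nat) : Int) := by push_cast; omega
          omega

-- ===== VERDICT (by name: the statement is the Claim_ definition above) =====
theorem get_nmods_spec : Claim_equal_get_nmods := by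
  intro inp nmods _
  unfold Spec_get_nmods get_nmods get_nmods_alt
  have h := pvMain ((PySem.Str.split? inp " ").getD []) (((PySem.Str.split? inp " ").getD []).length)
    0 (by omega) nmods 0 0
  simpa using h
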